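-- pv_equiv track=rewrite | github.com/Sprice21/TextMapGame | remake/remake.py | specSplit
-- ===== SOURCE A (Python) =====
-- def swap(i,it): return it[(it.index(i)+1)%2]
--
-- def dictFlatten(d): return [d[k] for k in d]
--
-- def specSplit(st,spChar, exclusion=[]):
--     eDict = {}
--     for i in exclusion: eDict[i] = False
--     out = [st]
--     invalid = True
--     while invalid:
--         invalid = False
--         for c,l in enumerate(out[-1]):
--             if l in eDict: eDict[l] = swap(eDict[l],[True,False])
--             if l == spChar and not any(dictFlatten(eDict)):
--                 invalid = True
--                 break
--         if invalid: out = out[:-1] + [out[-1][:c]] + [out[-1][c+1:]]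
--     return out
-- ===== SOURCE B (Python) =====
-- def specSplit(st, spChar, exclusion=[]):
--     # Single left-to-right pass: toggle exclusion flags, cut at spChar when all flags are off.
--     active = dict.fromkeys(exclusion, False)
--     out = []
--     cur = []
--     for l in st:
--         if l in active:
--             active[l] = not active[l]
--         if l == spChar and not any(active.values()):
--             out.append(''.join(cur))
--             cur = []
--         else:
--             cur.append(l)
--     out.append(''.join(cur))
--     return out
-- ===== Notes on version B (the rewrite author's own statement) =====
-- stated objective: simpler
-- what changed: A repeatedly rescans the last segment from scratch after every cut (while-loop with an inner enumerate+break and list slicing); B makes a single left-to-right pass over the string, toggling the exclusion flags and emitting a segment whenever the split character is seen with all flags off.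
import Mathlib
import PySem

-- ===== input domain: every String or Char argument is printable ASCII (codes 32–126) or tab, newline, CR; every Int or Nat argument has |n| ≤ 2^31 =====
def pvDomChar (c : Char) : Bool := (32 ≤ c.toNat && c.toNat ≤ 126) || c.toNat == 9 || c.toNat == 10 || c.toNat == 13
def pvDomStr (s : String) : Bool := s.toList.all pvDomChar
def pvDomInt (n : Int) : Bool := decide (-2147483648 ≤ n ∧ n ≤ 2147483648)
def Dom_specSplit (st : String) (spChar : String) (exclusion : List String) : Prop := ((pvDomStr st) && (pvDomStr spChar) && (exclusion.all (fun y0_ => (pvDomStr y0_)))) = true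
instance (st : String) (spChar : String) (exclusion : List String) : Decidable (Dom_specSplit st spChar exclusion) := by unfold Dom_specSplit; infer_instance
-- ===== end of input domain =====

-- B replaces A's repeated rescans of the last segment by a single left-to-right pass that
-- toggles the exclusion flags and emits segments; A = B everywhere (A is total).

-- ===== PORT A =====
-- swap(i, it): it.index(i) and it[(…+1)%2]; A only calls it with it = [True, False], where
-- index never raises and the index is in range, so the .getD defaults are never taken.
def pySwap (i : Bool) (it : List Bool) : Bool :=
  (PySem.List.pyGet? it (PySem.Int.mod (((PySem.List.index? it i).getD 0 : Int) + 1) 2)).getD false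

-- dictFlatten(d) = [d[k] for k in d]; keys are always present, so getD's default is never taken
def dictFlatten (d : PySem.Dict String Bool) : List Bool :=
  d.keys.map (fun k => d.getD k false)

-- 'if l in eDict: eDict[l] = swap(eDict[l], [True, False])' (l a 1-character string)
def toggleA (d : PySem.Dict String Bool) (l : Char) : PySem.Dict String Bool :=
  if d.contains (String.singleton l) then
    d.insert (String.singleton l) (pySwap (d.getD (String.singleton l) false) [true, false])
  else d

-- inner 'for c,l in enumerate(out[-1]): … break': returns the dict after the scanned prefix and
-- some c at the break index (none if no break); i is the running enumerate counter
def scanA (sp : String) (d : PySem.Dict String Bool) (chars : List Char) (i : Nat) :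
    PySem.Dict String Bool × Option Nat :=
  match chars with
  | [] => (d, none)
  | l :: rest =>
    let d' := toggleA d l
    if String.singleton l = sp ∧ (dictFlatten d').any id = false then (d', some i)
    else scanA sp d' rest (i + 1)

theorem scanA_some_lt (sp : String) (d : PySem.Dict String Bool) (chars : List Char) (i : Nat)
    (d' : PySem.Dict String Bool) (c : Nat) (h : scanA sp d chars i = (d', some c)) :
    c < i + chars.length := by
  induction chars generalizing d i with
  | nil => simp [scanA] at h
  | cons l rest ih =>
    simp only [scanA] at h
    split at h
    · rw [Prod.mk.injEq] at h
      obtain ⟨-, h2⟩ := h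
      injection h2 with h3
      simp only [List.length_cons]
      omega
    · have := ih _ _ h
      simp only [List.length_cons]
      omega

-- the while loop; 'out' is represented as out-prefix ++ [last segment]:
-- out[:-1] + [out[-1][:c]] + [out[-1][c+1:]] (c ≥ 0, so the slices are take/drop, exact)
def loopA (sp : String) (d : PySem.Dict String Bool) (out : List String) (last : List Char) :
    List String :=
  match h : scanA sp d last 0 with
  | (_, none) => out ++ [String.ofList last]
  | (d', some c) => loopA sp d' (out ++ [String.ofList (last.take c)]) (last.drop (c + 1))
termination_by last.length
decreasing_by
  have := scanA_some_lt sp d last 0 d' c h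
  simp only [List.length_drop]
  omega

def specSplit (st : String) (spChar : String) (exclusion : List String) : List String :=
  let eDict := exclusion.foldl (fun d i => d.insert i false) PySem.Dict.empty
  loopA spChar eDict [] st.toList

-- ===== PORT B =====
-- 'if l in active: active[l] = not active[l]'
def toggleB (d : PySem.Dict String Bool) (l : Char) : PySem.Dict String Bool :=
  if d.contains (String.singleton l) then
    d.insert (String.singleton l) (!(d.getD (String.singleton l) false))
  else d

-- one step of B's for-loop over the characters; state = (active, out, cur)
def stepB (sp : String) (s : PySem.Dict String Bool × List String × List Char) (l : Char) :
    PySem.Dict String Bool × List String × List Char :=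
  let d := toggleB s.1 l
  if String.singleton l = sp ∧ d.values.any id = false then (d, s.2.1 ++ [String.ofList s.2.2], [])
  else (d, s.2.1, s.2.2 ++ [l])

def specSplit_alt (st : String) (spChar : String) (exclusion : List String) : List String :=
  let active := exclusion.foldl (fun d e => d.insert e false) PySem.Dict.empty
  let r := st.toList.foldl (stepB spChar) (active, [], [])
  r.2.1 ++ [String.ofList r.2.2]

-- ===== PRECONDITION & SPEC =====
def Spec_specSplit (st : String) (spChar : String) (exclusion : List String) (out : List String) : Prop := out = specSplit_alt st spChar exclusion
instance (st : String) (spChar : String) (exclusion : List String) (out : List String) : Decidable (Spec_specSplit st spChar exclusion out) := by unfold Spec_specSplit; infer_instance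

-- ===== CLAIM (what is proved, stated in full; the proofs are below) =====
def Claim_equal_specSplit : Prop := ∀ (st : String) (spChar : String) (exclusion : List String), Dom_specSplit st spChar exclusion → Spec_specSplit st spChar exclusion (specSplit st spChar exclusion)

-- ===== LEMMAS AND PROOFS =====

theorem pySwap_tf (b : Bool) : pySwap b [true, false] = !b := by cases b <;> decide

theorem toggleB_eq (d : PySem.Dict String Bool) (l : Char) : toggleB d l = toggleA d l := by
  simp [toggleA, toggleB, pySwap_tf]

theorem dictFlatten_eq_values (d : PySem.Dict String Bool) (hnd : d.keys.Nodup) :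
    dictFlatten d = d.values := by
  rw [dictFlatten, ← PySem.Dict.values_eq_map_keys d hnd false]

theorem toggleA_nodup (d : PySem.Dict String Bool) (l : Char) (hnd : d.keys.Nodup) :
    (toggleA d l).keys.Nodup := by
  rw [toggleA]
  split
  · exact PySem.Dict.nodup_keys_insert d _ _ hnd
  · exact hnd

theorem scanA_nodup (sp : String) (d : PySem.Dict String Bool) (chars : List Char) (i : Nat)
    (hnd : d.keys.Nodup) : (scanA sp d chars i).1.keys.Nodup := by
  induction chars generalizing d i with
  | nil => simpa [scanA] using hnd
  | cons l rest ih =>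
    simp only [scanA]
    have h' := toggleA_nodup d l hnd
    split
    · simpa using h'
    · exact ih _ _ h'

-- scanA's result does not depend on the enumerate counter except by a shift
theorem scanA_shift (sp : String) (d : PySem.Dict String Bool) (chars : List Char) (i : Nat) :
    scanA sp d chars i = ((scanA sp d chars 0).1, (scanA sp d chars 0).2.map (· + i)) := by
  induction chars generalizing d i with
  | nil => simp [scanA]
  | cons l rest ih =>
    simp only [scanA]
    by_cases hc : String.singleton l = sp ∧ (dictFlatten (toggleA d l)).any id = false
    · simp [hc]
    · simp only [if_neg hc]
      rcases hbase : scanA sp (toggleA d l) rest 0 with ⟨bd, bo⟩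
      rw [ih _ (i + 1), ih _ 1, hbase]
      cases bo <;> simp
      omega

-- the core correspondence: one scan-and-cut of A equals folding B's step over the same chars
theorem scan_fold (sp : String) (chars : List Char) (d : PySem.Dict String Bool)
    (out : List String) (cur : List Char) (hnd : d.keys.Nodup) :
    List.foldl (stepB sp) (d, out, cur) chars =
      (match scanA sp d chars 0 with
       | (d', none) => (d', out, cur ++ chars)
       | (d', some c) =>
           List.foldl (stepB sp) (d', out ++ [String.ofList (cur ++ chars.take c)], [])
             (chars.drop (c + 1))) := by
  induction chars generalizing d out cur with
  | nil => simp [scanA]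
  | cons l rest ih =>
    have hnd' : (toggleA d l).keys.Nodup := toggleA_nodup d l hnd
    have hstep : stepB sp (d, out, cur) l =
        (if String.singleton l = sp ∧ (dictFlatten (toggleA d l)).any id = false then
          (toggleA d l, out ++ [String.ofList cur], [])
         else (toggleA d l, out, cur ++ [l])) := by
      simp only [stepB, toggleB_eq, dictFlatten_eq_values _ hnd']
    simp only [List.foldl_cons, hstep, scanA]
    by_cases hc : String.singleton l = sp ∧ (dictFlatten (toggleA d l)).any id = false
    · simp [hc]
    · simp only [if_neg hc]
      rw [ih (toggleA d l) out (cur ++ [l]) hnd']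
      rw [scanA_shift sp (toggleA d l) rest 1]
      rcases hbase : scanA sp (toggleA d l) rest 0 with ⟨bd, bo⟩
      cases bo with
      | none => simp
      | some c => simp [List.take_succ_cons, List.drop_succ_cons]

theorem loop_fold (sp : String) (n : Nat) : ∀ (last : List Char), last.length ≤ n →
    ∀ (d : PySem.Dict String Bool) (out : List String), d.keys.Nodup →
    loopA sp d out last =
      (fun r => r.2.1 ++ [String.ofList r.2.2]) (List.foldl (stepB sp) (d, out, []) last) := by
  induction n using Nat.strong_induction_on with
  | _ n ihn =>
    intro last hlen d out hnd
    rw [loopA.eq_def]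
    split
    · next d1 hscan =>
      rw [scan_fold sp last d out [] hnd, hscan]
      simp
    · next d' c hscan =>
      have hc := scanA_some_lt sp d last 0 d' c hscan
      have hnd' : d'.keys.Nodup := by
        have := scanA_nodup sp d last 0 hnd
        rw [hscan] at this
        exact this
      rw [scan_fold sp last d out [] hnd, hscan]
      simp only [List.nil_append]
      exact ihn (n - 1) (by omega) _ (by simp only [List.length_drop]; omega) d' _ hnd'

-- ===== VERDICT (by name: the statement is the Claim_ definition above) =====
theorem specSplit_spec : Claim_equal_specSplit := by
  intro st spChar exclusion _
  unfold Spec_specSplit specSplit specSplit_alt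
  have hnd : (exclusion.foldl (fun d i => d.insert i false) PySem.Dict.empty).keys.Nodup :=
    PySem.Dict.nodup_keys_foldl_insert exclusion (fun _ _ => false) PySem.Dict.empty
      PySem.Dict.nodup_keys_empty
  rw [loop_fold spChar st.toList.length st.toList le_rfl _ [] hnd]
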